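-- pv_equiv track=rewrite | github.com/ManojKumarPatnaik/practice-alg | Solution/BankTransfers.py | solution
-- ===== SOURCE A (Python) =====
-- def solution(R, V):
--   """
--   Returns the minimum initial account balances for banks A and B in order to complete the transfers.
--
--   Args:
--     R: A string representing the recipients of the transfers.
--     V: An array of integers representing the values of the transfers.
--
--   Returns:
--     An array of two integers representing the minimum initial account balances for banks A and B.
--   """
--
--   # Initialize the initial balances for both banks.
--   initialBalanceA = 0
--   initialBalanceB = 0
--   # Initialize the current balances for both banks.
--   currentBalanceA = 0
--   currentBalanceB = 0
--
--   # Iterate over the transfers.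
--   for i in range(len(R)):
--     # Check if the current transfer is sent to bank A.
--     if R[i] == "A":
--       # Update the current balance for bank A.
--       currentBalanceA += V[i]
--       # Update the current balance for bank B.
--       currentBalanceB -= V[i]
--       # Update the minimum initial balance for bank B.
--       initialBalanceB = min(initialBalanceB, currentBalanceB)
--     else:
--       # Update the current balance for bank B.
--       currentBalanceB += V[i]
--        # Update the current balance for bank A.
--       currentBalanceA -= V[i]
--        # Update the minimum initial balance for bank A.
--       initialBalanceA = min(initialBalanceA, currentBalanceA)
--   # Return the minimum initial balances for both banks.
--   return [abs(initialBalanceA), abs(initialBalanceB)]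
-- ===== SOURCE B (Python) =====
-- def solution(R, V):
--   """Prefix-sum decomposition: build the table of bank A's relative balance
--   after each transfer, then take two filtered max-reductions."""
--   P = []
--   s = 0
--   for r, v in zip(R, V):
--     s += v if r == 'A' else -v
--     P.append(s)
--   a = max([0] + [-p for p, r in zip(P, R) if r != 'A'])
--   b = max([0] + [p for p, r in zip(P, R) if r == 'A'])
--   return [a, b]
-- ===== Notes on version B (the rewrite author's own statement) =====
-- stated objective: alternative
-- what changed: Replaces the single interleaved loop that maintains four running variables with a two-phase decomposition: one pass building the prefix-sum table of signed deltas, then two filtered max-reductions over that table.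
import Mathlib
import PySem

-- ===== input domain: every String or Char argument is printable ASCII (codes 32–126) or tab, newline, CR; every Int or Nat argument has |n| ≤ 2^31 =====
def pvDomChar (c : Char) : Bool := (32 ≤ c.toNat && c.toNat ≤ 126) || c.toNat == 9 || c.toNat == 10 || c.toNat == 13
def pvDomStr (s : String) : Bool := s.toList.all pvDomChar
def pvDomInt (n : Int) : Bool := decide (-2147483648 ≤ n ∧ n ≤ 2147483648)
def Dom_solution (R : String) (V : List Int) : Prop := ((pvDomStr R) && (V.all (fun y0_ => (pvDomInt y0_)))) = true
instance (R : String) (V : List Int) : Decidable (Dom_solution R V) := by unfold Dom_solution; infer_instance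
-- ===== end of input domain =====

-- B is an alternative decomposition (prefix-sum table + two filtered max-reductions) of A's
-- single interleaved loop; equivalence is proved on inputs with len(R) <= len(V).

-- ===== PORT A =====
-- literal port of A's index loop: state (initialBalanceA, initialBalanceB, currentBalanceA, currentBalanceB);
-- R[i] / V[i] are in range on Pre_ inputs, so pyGetD's defaults are never read there.
def solution (R : String) (V : List Int) : List Int :=
  let st := (PySem.List.pyRange 0 (PySem.Str.len R) 1).foldl
    (fun (st : Int × Int × Int × Int) i =>
      if PySem.List.pyGetD R.toList i ' ' = 'A' then
        let cA := st.2.2.1 + PySem.List.pyGetD V i 0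
        let cB := st.2.2.2 - PySem.List.pyGetD V i 0
        (st.1, min st.2.1 cB, cA, cB)
      else
        let cB := st.2.2.2 + PySem.List.pyGetD V i 0
        let cA := st.2.2.1 - PySem.List.pyGetD V i 0
        (min st.1 cA, st.2.1, cA, cB))
    (0, 0, 0, 0)
  [|st.1|, |st.2.1|]

-- ===== PORT B =====
-- literal port of Source B: build the prefix-sum table P, then two filtered max-reductions.
def solution_alt (R : String) (V : List Int) : List Int :=
  let P := ((R.toList.zip V).foldl
      (fun (acc : List Int × Int) rv =>
        let s := acc.2 + (if rv.1 = 'A' then rv.2 else -rv.2)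
        (acc.1 ++ [s], s)) ([], 0)).1
  let a := ((P.zip R.toList).filterMap
      (fun pr => if pr.2 ≠ 'A' then some (-pr.1) else none)).foldl max 0
  let b := ((P.zip R.toList).filterMap
      (fun pr => if pr.2 = 'A' then some pr.1 else none)).foldl max 0
  [a, b]

-- ===== PRECONDITION & SPEC =====
-- A indexes V[i] for every i < len(R), so it raises IndexError when len(V) < len(R).
def Pre_solution (R : String) (V : List Int) : Prop := R.toList.length ≤ V.length
instance (R : String) (V : List Int) : Decidable (Pre_solution R V) := by unfold Pre_solution; infer_instance
def pvWitness_solution : String × List Int := ("AB", [1, 2])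

def Spec_solution (R : String) (V : List Int) (out : List Int) : Prop := out = solution_alt R V
instance (R : String) (V : List Int) (out : List Int) : Decidable (Spec_solution R V out) := by unfold Spec_solution; infer_instance

-- ===== CLAIM (what is proved, stated in full; the proofs are below) =====
def Claim_equal_solution : Prop := ∀ (R : String) (V : List Int), Dom_solution R V → Pre_solution R V → Spec_solution R V (solution R V)

-- ===== LEMMAS AND PROOFS =====

-- A's loop step on the zipped list
def aStep (st : Int × Int × Int × Int) (rv : Char × Int) : Int × Int × Int × Int :=
  if rv.1 = 'A' then
    (st.1, min st.2.1 (st.2.2.2 - rv.2), st.2.2.1 + rv.2, st.2.2.2 - rv.2)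
  else
    (min st.1 (st.2.2.1 - rv.2), st.2.1, st.2.2.1 - rv.2, st.2.2.2 + rv.2)

-- scalar recursions capturing the two answers
def gA : List (Char × Int) → Int → Int → Int
  | [], _, a => a
  | (r, v) :: t, s, a => if r = 'A' then gA t (s + v) a else gA t (s - v) (max a (-(s - v)))

def gB : List (Char × Int) → Int → Int → Int
  | [], _, b => b
  | (r, v) :: t, s, b => if r = 'A' then gB t (s + v) (max b (s + v)) else gB t (s - v) b

-- prefix-sum table of signed deltas
def pfx : List (Char × Int) → Int → List Int
  | [], _ => []
  | (r, v) :: t, s => let s' := s + (if r = 'A' then v else -v); s' :: pfx t s'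

lemma range_fold_eq_zip_fold {σ : Type} (f : σ → Char → Int → σ) :
    ∀ (xs : List Char) (ys : List Int) (X : List Char) (Y : List Int) (a : Nat) (init : σ),
    X.drop a = xs → Y.drop a = ys → xs.length ≤ ys.length →
    (PySem.List.pyRange a (a + xs.length) 1).foldl
      (fun s i => f s (PySem.List.pyGetD X i ' ') (PySem.List.pyGetD Y i 0)) init
    = (xs.zip ys).foldl (fun s p => f s p.1 p.2) init := by
  intro xs
  induction xs with
  | nil =>
    intro ys X Y a init _ _ _
    rw [show ((a : Int) + ((List.length ([] : List Char)) : Int)) = (a : Int) by simp,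
        PySem.List.pyRange_one_eq_nil le_rfl]
    rfl
  | cons x t ih =>
    intro ys X Y a init hX hY hlen
    cases ys with
    | nil => simp at hlen
    | cons y ty =>
      have ha : (a : Int) < a + (↑(List.length (x :: t))) := by simp only [List.length_cons]; omega
      rw [PySem.List.pyRange_one_cons ha]
      have hXa : PySem.List.pyGetD X (a : Int) ' ' = x := by
        rw [PySem.List.pyGetD_natCast]
        have hx : X[a]? = some x := by rw [← List.head?_drop, hX]; rfl
        simp [List.getD, hx]
      have hYa : PySem.List.pyGetD Y (a : Int) 0 = y := by
        rw [PySem.List.pyGetD_natCast]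
        have hy : Y[a]? = some y := by rw [← List.head?_drop, hY]; rfl
        simp [List.getD, hy]
      simp only [List.foldl_cons, List.zip_cons_cons, hXa, hYa]
      have h1 : ((a : Int) + 1) = ((a + 1 : Nat) : Int) := by simp
      have h2 : ((a : Int) + ↑(List.length (x :: t))) = ((a + 1 : Nat) : Int) + (t.length : Int) := by
        simp only [List.length_cons]; push_cast; ring
      rw [h2, h1]
      apply ih ty X Y (a + 1)
      · rw [← List.drop_drop, hX]; simp
      · rw [← List.drop_drop, hY]; simp
      · simpa using hlen

-- A's fold computes the negations of gA and gB
lemma afold_eq_g : ∀ (l : List (Char × Int)) (a b s : Int),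
    l.foldl aStep (-a, -b, s, -s)
      = (-(gA l s a), -(gB l s b), (l.foldl aStep (-a, -b, s, -s)).2.2) := by
  intro l
  induction l with
  | nil => intro a b s; simp [gA, gB]
  | cons rv t ih =>
    intro a b s
    obtain ⟨r, v⟩ := rv
    by_cases hr : r = 'A'
    · have hstep : aStep (-a, -b, s, -s) (r, v) = (-a, -(max b (s + v)), s + v, -(s + v)) := by
        simp [aStep, hr]; omega
      rw [List.foldl_cons, hstep,
        show gA ((r, v) :: t) s a = gA t (s + v) a by simp [gA, hr],
        show gB ((r, v) :: t) s b = gB t (s + v) (max b (s + v)) by simp [gB, hr]]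
      exact ih a (max b (s + v)) (s + v)
    · have hstep : aStep (-a, -b, s, -s) (r, v) = (-(max a (-(s - v))), -b, s - v, -(s - v)) := by
        simp [aStep, hr]; omega
      rw [List.foldl_cons, hstep,
        show gA ((r, v) :: t) s a = gA t (s - v) (max a (-(s - v))) by simp [gA, hr],
        show gB ((r, v) :: t) s b = gB t (s - v) b by simp [gB, hr]]
      exact ih (max a (-(s - v))) b (s - v)

-- B's table-building fold produces pfx
lemma bfold_eq_pfx : ∀ (l : List (Char × Int)) (acc : List Int) (s : Int),
    (l.foldl (fun (acc : List Int × Int) rv =>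
        let s := acc.2 + (if rv.1 = 'A' then rv.2 else -rv.2)
        (acc.1 ++ [s], s)) (acc, s)).1 = acc ++ pfx l s := by
  intro l
  induction l with
  | nil => intro acc s; simp [pfx]
  | cons rv t ih =>
    intro acc s
    obtain ⟨r, v⟩ := rv
    simp only [List.foldl_cons, pfx]
    rw [ih]
    simp

-- B's first max-reduction is gA
lemma bredA_eq_gA : ∀ (l : List (Char × Int)) (s a : Int),
    (((pfx l s).zip (l.map Prod.fst)).filterMap
        (fun pr => if pr.2 ≠ 'A' then some (-pr.1) else none)).foldl max a = gA l s a := by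
  intro l
  induction l with
  | nil => intro s a; simp [pfx, gA]
  | cons rv t ih =>
    intro s a
    obtain ⟨r, v⟩ := rv
    by_cases hr : r = 'A'
    · rw [show pfx ((r, v) :: t) s = (s + v) :: pfx t (s + v) by simp [pfx, hr],
        show gA ((r, v) :: t) s a = gA t (s + v) a by simp [gA, hr]]
      simp only [List.map_cons, List.zip_cons_cons, List.filterMap_cons]
      rw [if_neg (by simp [hr] : ¬ r ≠ 'A')]
      exact ih (s + v) a
    · rw [show pfx ((r, v) :: t) s = (s - v) :: pfx t (s - v) by simp [pfx, hr, sub_eq_add_neg],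
        show gA ((r, v) :: t) s a = gA t (s - v) (max a (-(s - v))) by simp [gA, hr]]
      simp only [List.map_cons, List.zip_cons_cons, List.filterMap_cons]
      rw [if_pos (by simp [hr] : r ≠ 'A')]
      exact ih (s - v) (max a (-(s - v)))

-- B's second max-reduction is gB
lemma bredB_eq_gB : ∀ (l : List (Char × Int)) (s b : Int),
    (((pfx l s).zip (l.map Prod.fst)).filterMap
        (fun pr => if pr.2 = 'A' then some pr.1 else none)).foldl max b = gB l s b := by
  intro l
  induction l with
  | nil => intro s b; simp [pfx, gB]
  | cons rv t ih =>
    intro s b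
    obtain ⟨r, v⟩ := rv
    by_cases hr : r = 'A'
    · rw [show pfx ((r, v) :: t) s = (s + v) :: pfx t (s + v) by simp [pfx, hr],
        show gB ((r, v) :: t) s b = gB t (s + v) (max b (s + v)) by simp [gB, hr]]
      simp only [List.map_cons, List.zip_cons_cons, List.filterMap_cons]
      rw [if_pos hr]
      exact ih (s + v) (max b (s + v))
    · rw [show pfx ((r, v) :: t) s = (s - v) :: pfx t (s - v) by simp [pfx, hr, sub_eq_add_neg],
        show gB ((r, v) :: t) s b = gB t (s - v) b by simp [gB, hr]]
      simp only [List.map_cons, List.zip_cons_cons, List.filterMap_cons]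
      rw [if_neg hr]
      exact ih (s - v) b

lemma le_gA : ∀ (l : List (Char × Int)) (s a : Int), a ≤ gA l s a := by
  intro l
  induction l with
  | nil => intro s a; simp [gA]
  | cons rv t ih =>
    intro s a
    obtain ⟨r, v⟩ := rv
    by_cases hr : r = 'A'
    · simpa [gA, hr] using ih (s + v) a
    · simp only [gA, if_neg hr]
      exact le_trans (le_max_left _ _) (ih (s - v) (max a (-(s - v))))

lemma le_gB : ∀ (l : List (Char × Int)) (s b : Int), b ≤ gB l s b := by
  intro l
  induction l with
  | nil => intro s b; simp [gB]
  | cons rv t ih =>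
    intro s b
    obtain ⟨r, v⟩ := rv
    by_cases hr : r = 'A'
    · simp only [gB, if_pos hr]
      exact le_trans (le_max_left _ _) (ih (s + v) (max b (s + v)))
    · simpa [gB, hr] using ih (s - v) b

-- ===== VERDICT (by name: the statement is the Claim_ definition above) =====
theorem solution_spec : Claim_equal_solution := by
  intro R V _ hpre
  unfold Pre_solution at hpre
  unfold Spec_solution solution solution_alt
  set l := R.toList.zip V with hl
  have hfst : l.map Prod.fst = R.toList := List.map_fst_zip hpre
  -- A side: turn the range fold into a zip fold
  have hA : (PySem.List.pyRange 0 (PySem.Str.len R) 1).foldl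
      (fun (st : Int × Int × Int × Int) i =>
        if PySem.List.pyGetD R.toList i ' ' = 'A' then
          (st.1, min st.2.1 (st.2.2.2 - PySem.List.pyGetD V i 0),
            st.2.2.1 + PySem.List.pyGetD V i 0, st.2.2.2 - PySem.List.pyGetD V i 0)
        else
          (min st.1 (st.2.2.1 - PySem.List.pyGetD V i 0), st.2.1,
            st.2.2.1 - PySem.List.pyGetD V i 0, st.2.2.2 + PySem.List.pyGetD V i 0))
      (0, 0, 0, 0)
      = l.foldl aStep (0, 0, 0, 0) := by
    have hlenR : PySem.Str.len R = ((R.toList.length : Nat) : Int) := by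
      simp [PySem.Str.len_eq]
    have := range_fold_eq_zip_fold
      (f := fun (st : Int × Int × Int × Int) (r : Char) (v : Int) =>
        if r = 'A' then
          (st.1, min st.2.1 (st.2.2.2 - v), st.2.2.1 + v, st.2.2.2 - v)
        else
          (min st.1 (st.2.2.1 - v), st.2.1, st.2.2.1 - v, st.2.2.2 + v))
      R.toList V R.toList V 0 (0, 0, 0, 0) (by simp) (by simp) hpre
    simp only [Nat.cast_zero, zero_add] at this
    rw [hlenR, this]
    rfl
  simp only [hA]
  have hafold := afold_eq_g l 0 0 0
  simp only [neg_zero] at hafold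
  rw [hafold]
  -- B side
  have hP := bfold_eq_pfx l [] 0
  simp only [List.nil_append] at hP
  rw [hP, ← hfst, bredA_eq_gA, bredB_eq_gB]
  have h1 : (0 : Int) ≤ gA l 0 0 := le_gA l 0 0
  have h2 : (0 : Int) ≤ gB l 0 0 := le_gB l 0 0
  simp [abs_of_nonpos, h1, h2]
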